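-- pv_equiv track=rewrite | github.com/frobnitzem/mpi_list | src/mpi_list/segment.py | even_spread
-- ===== SOURCE A (Python) =====
-- def even_spread(M, N):
--     """Return a list of target sizes for an even spread.
--
--     Output sizes are either M//N or M//N+1
--
--     Args:
--         M: number of elements
--         N: number of partitons
--
--      Returns:
--         target_sizes : [int]
--               len(target_sizes) == N
--               sum(target_sizes) == M
--
--     """
--     if N == 0:
--         assert M == 0
--         return []
--     tgt = [ M//N ]*N
--     for i in range(M%N):
--         tgt[i] += 1
--     return tgt
-- ===== SOURCE B (Python) =====
-- def even_spread(M, N):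
--     """Greedy: for each remaining partition count n = N..1, take the
--     ceiling of remaining/n as the next part and subtract it."""
--     if N == 0:
--         assert M == 0
--         return []
--     out = []
--     rem = M
--     for n in range(N, 0, -1):
--         k = -(-rem // n)
--         out.append(k)
--         rem -= k
--     return out
-- ===== Notes on version B (the rewrite author's own statement) =====
-- stated objective: alternative
-- what changed: Replaces A's allocate-then-increment scheme (build [M//N]*N, then bump the first M%N entries) with a greedy single pass that never computes a quotient/remainder split of M: counting remaining partitions n down from N to 1, each part is the ceiling -(-rem//n) of the shrinking remainder, which is then subtracted.
import Mathlib
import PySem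

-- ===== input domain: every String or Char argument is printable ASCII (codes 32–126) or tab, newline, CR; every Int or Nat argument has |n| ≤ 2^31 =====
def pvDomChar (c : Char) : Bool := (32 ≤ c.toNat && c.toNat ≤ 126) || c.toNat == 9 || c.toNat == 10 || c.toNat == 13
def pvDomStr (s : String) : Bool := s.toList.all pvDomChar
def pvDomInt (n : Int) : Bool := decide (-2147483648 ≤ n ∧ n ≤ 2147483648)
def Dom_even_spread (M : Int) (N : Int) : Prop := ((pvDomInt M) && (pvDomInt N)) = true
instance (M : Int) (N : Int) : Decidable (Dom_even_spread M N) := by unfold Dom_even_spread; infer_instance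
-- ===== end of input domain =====

-- B replaces A's allocate-then-increment scheme with a greedy countdown loop: each part
-- is the ceiling of the shrinking remainder over the remaining partition count (alternative algorithm).

-- ===== PORT A =====
def even_spread (M : Int) (N : Int) : List Int :=
  if N = 0 then []          -- 'assert M == 0' raises AssertionError when M ≠ 0; excluded by Pre_
  else
    -- tgt = [M//N]*N  (Python list repetition: empty for N < 0, matched by toNat's clamp)
    let tgt := List.replicate N.toNat (PySem.Int.floordiv M N)
    -- for i in range(M%N): tgt[i] += 1   (i is always a valid nonnegative index here)
    (PySem.List.pyRange 0 (PySem.Int.mod M N) 1).foldl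
      (fun t i => t.modify i.toNat (· + 1)) tgt

-- ===== PORT B =====
def even_spread_alt (M : Int) (N : Int) : List Int :=
  if N = 0 then []          -- same assert-guard as A
  else
    -- for n in range(N, 0, -1): k = -(-rem // n); out.append(k); rem -= k
    ((PySem.List.pyRange N 0 (-1)).foldl
      (fun (p : List Int × Int) n =>
        let k := -(PySem.Int.floordiv (-p.2) n)
        (p.1 ++ [k], p.2 - k))
      ([], M)).1

-- ===== PRECONDITION & SPEC =====
-- Pre_ excludes only N = 0 with M ≠ 0, where A's assert raises AssertionError (B asserts identically).
def Pre_even_spread (M : Int) (N : Int) : Prop := N = 0 → M = 0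
instance (M : Int) (N : Int) : Decidable (Pre_even_spread M N) := by unfold Pre_even_spread; infer_instance
def pvWitness_even_spread : Int × Int := (7, 3)
def Spec_even_spread (M : Int) (N : Int) (out : List Int) : Prop := out = even_spread_alt M N
instance (M : Int) (N : Int) (out : List Int) : Decidable (Spec_even_spread M N out) := by unfold Spec_even_spread; infer_instance

-- ===== CLAIM (what is proved, stated in full; the proofs are below) =====
def Claim_equal_even_spread : Prop := ∀ (M : Int) (N : Int), Dom_even_spread M N → Pre_even_spread M N → Spec_even_spread M N (even_spread M N)

-- ===== LEMMAS AND PROOFS =====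

-- Common closed form both ports are proved equal to (proof-only helper).
def twoBlock (M N : Int) : List Int :=
  List.replicate (PySem.Int.mod M N).toNat (PySem.Int.floordiv M N + 1)
    ++ List.replicate (N - PySem.Int.mod M N).toNat (PySem.Int.floordiv M N)

-- Incrementing the element at index r of a list that is uniform up to r hits the head of the tail block.
theorem modify_rep_append (q x : Int) (rest : List Int) (r : Nat) :
    (List.replicate r x ++ q :: rest).modify r (· + 1) = List.replicate r x ++ (q + 1) :: rest := by
  induction r with
  | zero => simp [List.modify]
  | succ n ih => simpa [List.replicate_succ, List.modify] using ih

-- A's increment loop over range(r) turns [q]*n into [q+1]*r ++ [q]*(n-r).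
theorem inc_prefix (q : Int) (r n : Nat) (h : r ≤ n) :
    (PySem.List.pyRange 0 (r : Int) 1).foldl (fun t i => t.modify i.toNat (· + 1))
        (List.replicate n q)
      = List.replicate r (q + 1) ++ List.replicate (n - r) q := by
  induction r with
  | zero => simp [PySem.List.pyRange_one_eq_nil (le_refl (0 : Int))]
  | succ m ih =>
    have hcast : ((m + 1 : Nat) : Int) = (m : Int) + 1 := by push_cast; ring
    rw [hcast, PySem.List.pyRange_one_succ_right (by positivity), List.foldl_append,
        ih (by omega)]
    simp only [List.foldl_cons, List.foldl_nil, Int.toNat_natCast]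
    obtain ⟨k, hk⟩ : ∃ k, n - m = k + 1 := ⟨n - m - 1, by omega⟩
    have hk2 : n - (m + 1) = k := by omega
    rw [hk, hk2, List.replicate_succ, modify_rep_append,
        List.replicate_succ', List.append_assoc]
    rfl

-- Uniqueness of Euclidean division with a positive divisor (used for the greedy step).
theorem ediv_emod_of_eq (a b q r : Int) (hb : 0 < b) (h : a = b * q + r)
    (h0 : 0 ≤ r) (h1 : r < b) : a / b = q ∧ a % b = r := by
  constructor
  · rw [h, show b * q + r = r + b * q from by ring,
        Int.add_mul_ediv_left r q hb.ne', Int.ediv_eq_zero_of_lt h0 h1, zero_add]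
  · rw [h, show b * q + r = r + b * q from by ring, Int.add_mul_emod_self_left,
        Int.emod_eq_of_lt h0 h1]

-- B's greedy countdown over range(n+1, 0, -1) produces the two-block form of rem.
theorem greedy_spec (n : Nat) : ∀ (out : List Int) (rem : Int),
    ((PySem.List.pyRange ((n : Int) + 1) 0 (-1)).foldl
      (fun (p : List Int × Int) i =>
        let k := -(PySem.Int.floordiv (-p.2) i)
        (p.1 ++ [k], p.2 - k)) (out, rem)).1
    = out ++ twoBlock rem ((n : Int) + 1) := by
  induction n with
  | zero =>
    intro out rem
    simp only [Nat.cast_zero, zero_add]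
    rw [PySem.List.pyRange_neg_one_cons (by norm_num),
        show (1 : Int) - 1 = 0 from by ring,
        PySem.List.pyRange_neg_one_eq_nil (le_refl 0)]
    simp [twoBlock, PySem.Int.floordiv, PySem.Int.mod]
  | succ m ih =>
    intro out rem
    have hd : (0 : Int) < ((m + 1 : Nat) : Int) + 1 := by positivity
    rw [PySem.List.pyRange_neg_one_cons hd, List.foldl_cons,
        show ((m + 1 : Nat) : Int) + 1 - 1 = (m : Int) + 1 from by push_cast; ring]
    set d : Int := ((m + 1 : Nat) : Int) + 1 with hdd
    show ((PySem.List.pyRange ((m : Int) + 1) 0 (-1)).foldl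
        (fun (p : List Int × Int) i =>
          let k := -(PySem.Int.floordiv (-p.2) i)
          (p.1 ++ [k], p.2 - k))
        (out ++ [-(PySem.Int.floordiv (-rem) d)], rem - -(PySem.Int.floordiv (-rem) d))).1
      = out ++ twoBlock rem d
    set k : Int := -(PySem.Int.floordiv (-rem) d) with hkk
    rw [ih]
    have hd2 : d = (m : Int) + 2 := by rw [hdd]; push_cast; ring
    have hq : d * (rem / d) + rem % d = rem := Int.mul_ediv_add_emod rem d
    have hr0 : 0 ≤ rem % d := Int.emod_nonneg _ (by omega)
    have hrd : rem % d < d := Int.emod_lt_of_pos _ (by omega)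
    have hkmod : PySem.Int.floordiv (-rem) d = (-rem) / d :=
      PySem.Int.floordiv_eq_ediv_of_pos (by omega)
    have hmodd : PySem.Int.mod rem d = rem % d := PySem.Int.mod_eq_emod_of_pos (by omega)
    have hdivd : PySem.Int.floordiv rem d = rem / d := PySem.Int.floordiv_eq_ediv_of_pos (by omega)
    have hmodd1 : PySem.Int.mod (rem - k) ((m : Int) + 1) = (rem - k) % ((m : Int) + 1) :=
      PySem.Int.mod_eq_emod_of_pos (by positivity)
    have hdivd1 : PySem.Int.floordiv (rem - k) ((m : Int) + 1) = (rem - k) / ((m : Int) + 1) :=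
      PySem.Int.floordiv_eq_ediv_of_pos (by positivity)
    by_cases hz : rem % d = 0
    · -- k = q and the remainder stays divisible: [q] ++ twoBlock(rem-q, m+1) = twoBlock rem d
      have hdk := ediv_emod_of_eq (-rem) d (-(rem / d)) 0 (by omega)
        (by linear_combination hq - hz) (le_refl 0) (by omega)
      have hk : k = rem / d := by rw [hkk, hkmod, hdk.1]; ring
      have hrem : rem - k = ((m : Int) + 1) * (rem / d) := by
        rw [hk]; linear_combination -hq + hz + (rem / d) * hd2
      have hdiv1 : (rem - k) / ((m : Int) + 1) = rem / d := by
        rw [hrem, Int.mul_ediv_cancel_left _ (by positivity)]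
      have hmd1 : (rem - k) % ((m : Int) + 1) = 0 := by rw [hrem, Int.mul_emod_right]
      simp only [twoBlock, hmodd1, hdivd1, hdiv1, hmd1, hmodd, hdivd, hz]
      rw [hk]
      simp only [Int.toNat_zero, List.replicate_zero, List.nil_append]
      have h5 : (d - 0).toNat = ((m : Int) + 1 - 0).toNat + 1 := by omega
      rw [h5, List.replicate_succ]
      simp
    · -- k = q+1: [q+1] ++ twoBlock(rem-(q+1), m+1) = twoBlock rem d
      have hdk := ediv_emod_of_eq (-rem) d (-(rem / d) - 1) (d - rem % d) (by omega)
        (by linear_combination hq) (by omega) (by omega)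
      have hk : k = rem / d + 1 := by rw [hkk, hkmod, hdk.1]; ring
      have hrem : rem - k = ((m : Int) + 1) * (rem / d) + (rem % d - 1) := by
        rw [hk]; linear_combination -hq + (rem / d) * hd2
      have hb := ediv_emod_of_eq (rem - k) ((m : Int) + 1) (rem / d) (rem % d - 1)
        (by positivity) hrem (by omega) (by omega)
      simp only [twoBlock, hmodd1, hdivd1, hb.1, hb.2, hmodd, hdivd]
      rw [hk]
      have h6 : (rem % d).toNat = (rem % d - 1).toNat + 1 := by omega
      have h7 : ((m : Int) + 1 - (rem % d - 1)).toNat = (d - rem % d).toNat := by omega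
      rw [h6, h7, List.replicate_succ]
      simp

theorem even_spread_eq_twoBlock (M N : Int) (h : N ≠ 0) : even_spread M N = twoBlock M N := by
  unfold even_spread twoBlock
  simp only [if_neg h]
  rcases lt_or_gt_of_ne h with hneg | hpos
  · -- N < 0 : A's range is empty and its base list is empty; both blocks are empty too.
    have hmm : PySem.Int.mod M N = -PySem.Int.mod (-M) (-N) := by
      have := PySem.Int.mod_neg_neg (-M) (-N)
      simpa using this
    have h1 : PySem.Int.mod (-M) (-N) = (-M) % (-N) :=
      PySem.Int.mod_eq_emod_of_pos (by omega)
    have h2 : 0 ≤ (-M) % (-N) := Int.emod_nonneg _ (by omega)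
    have h3 : (-M) % (-N) < -N := Int.emod_lt_of_pos _ (by omega)
    have hr0 : PySem.Int.mod M N ≤ 0 := by omega
    rw [PySem.List.pyRange_one_eq_nil hr0]
    simp [Int.toNat_of_nonpos (le_of_lt hneg), Int.toNat_of_nonpos hr0,
      Int.toNat_of_nonpos (by omega : N - PySem.Int.mod M N ≤ 0)]
  · -- N > 0 : 0 ≤ M % N < N, apply inc_prefix.
    have hm : PySem.Int.mod M N = M % N := PySem.Int.mod_eq_emod_of_pos hpos
    have hr0 : 0 ≤ PySem.Int.mod M N := by rw [hm]; exact Int.emod_nonneg _ (by omega)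
    have hrN : PySem.Int.mod M N < N := by rw [hm]; exact Int.emod_lt_of_pos _ hpos
    have hcast : PySem.Int.mod M N = ((PySem.Int.mod M N).toNat : Int) :=
      (Int.toNat_of_nonneg hr0).symm
    rw [hcast, inc_prefix _ _ N.toNat (by omega)]
    simp only [Int.toNat_natCast]
    congr 2
    omega

theorem even_spread_alt_eq_twoBlock (M N : Int) (h : N ≠ 0) : even_spread_alt M N = twoBlock M N := by
  unfold even_spread_alt
  simp only [if_neg h]
  rcases lt_or_gt_of_ne h with hneg | hpos
  · -- N < 0 : the countdown range is empty, B returns []; both blocks of twoBlock are empty.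
    rw [PySem.List.pyRange_neg_one_eq_nil (by omega)]
    have hmm : PySem.Int.mod M N = -PySem.Int.mod (-M) (-N) := by
      have := PySem.Int.mod_neg_neg (-M) (-N)
      simpa using this
    have h1 : PySem.Int.mod (-M) (-N) = (-M) % (-N) :=
      PySem.Int.mod_eq_emod_of_pos (by omega)
    have h2 : 0 ≤ (-M) % (-N) := Int.emod_nonneg _ (by omega)
    have h3 : (-M) % (-N) < -N := Int.emod_lt_of_pos _ (by omega)
    have hr0 : PySem.Int.mod M N ≤ 0 := by omega
    simp [twoBlock, Int.toNat_of_nonpos hr0,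
      Int.toNat_of_nonpos (by omega : N - PySem.Int.mod M N ≤ 0)]
  · obtain ⟨m, hm⟩ : ∃ m : Nat, N = (m : Int) + 1 := ⟨(N - 1).toNat, by omega⟩
    rw [hm]
    exact greedy_spec m [] M

-- ===== VERDICT (by name: the statement is the Claim_ definition above) =====
theorem even_spread_spec : Claim_equal_even_spread := by
  intro M N _ hpre
  unfold Spec_even_spread
  by_cases hN : N = 0
  · simp [even_spread, even_spread_alt, hN]
  · rw [even_spread_eq_twoBlock M N hN, even_spread_alt_eq_twoBlock M N hN]
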